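-- pv_equiv track=rewrite | github.com/shivanis1406/SeniorSafetyMonitoringSystem | orb_motion_detection.py | find_timestamp_clusters
-- ===== SOURCE A (Python) =====
-- def find_timestamp_clusters(fast_motion_timestamps, min_time_gap=5):
--     clusters = []  # List to hold the clusters of timestamps
--     current_cluster = []  # Temporary list to hold the current cluster
--
--     for i, timestamp in enumerate(fast_motion_timestamps):
--         # If it's the first timestamp, start a new cluster
--         if i == 0:
--             current_cluster.append(timestamp)
--         else:
--             # Check the time difference between the current and previous timestamp
--             if timestamp - fast_motion_timestamps[i-1] <= min_time_gap:
--                 # If the difference is less than or equal to the min_time_gap, add it to the current cluster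
--                 current_cluster.append(timestamp)
--             else:
--                 # If the difference is greater than min_time_gap, finish the current cluster and start a new one
--                 clusters.append(current_cluster)
--                 current_cluster = [timestamp]
--
--     # Add the last cluster to the clusters list
--     if current_cluster:
--         clusters.append(current_cluster)
--
--     return clusters
-- ===== SOURCE B (Python) =====
-- def find_timestamp_clusters(fast_motion_timestamps, min_time_gap=5):
--     # One reverse pass: build the clusters back-to-front (clusters and their
--     # contents are accumulated reversed, with O(1) appends), then un-reverse once.
--     rev = []
--     for t in reversed(fast_motion_timestamps):
--         if rev and rev[-1][-1] - t <= min_time_gap: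
--             rev[-1].append(t)
--         else:
--             rev.append([t])
--     return [c[::-1] for c in reversed(rev)]
-- ===== Notes on version B (the rewrite author's own statement) =====
-- stated objective: alternative
-- what changed: A scans forward over enumerate with a (clusters, current_cluster) accumulator, an xs[i-1] index lookup and a final flush of the last cluster; B instead makes a single reverse pass with no index arithmetic or separate current-cluster state, appending each timestamp into a back-to-front buffer of reversed clusters and un-reversing everything once at the end.
import Mathlib
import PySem

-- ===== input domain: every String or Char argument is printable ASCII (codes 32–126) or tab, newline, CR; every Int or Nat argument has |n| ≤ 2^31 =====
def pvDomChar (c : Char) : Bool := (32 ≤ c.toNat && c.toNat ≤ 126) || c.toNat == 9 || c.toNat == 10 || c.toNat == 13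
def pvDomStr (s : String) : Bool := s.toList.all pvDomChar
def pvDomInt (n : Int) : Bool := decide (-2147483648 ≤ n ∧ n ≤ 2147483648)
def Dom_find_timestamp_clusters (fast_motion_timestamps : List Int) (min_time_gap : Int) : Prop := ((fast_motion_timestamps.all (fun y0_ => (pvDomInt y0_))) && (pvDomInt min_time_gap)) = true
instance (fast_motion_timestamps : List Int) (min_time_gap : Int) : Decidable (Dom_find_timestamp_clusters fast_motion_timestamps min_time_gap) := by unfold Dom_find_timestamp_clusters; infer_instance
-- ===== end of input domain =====

-- B builds the clusters back-to-front in one reverse pass (prepend instead of append); alternative decomposition, same cost.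


-- ===== PORT A =====
-- literal port: fold over enumerate, state (clusters, current_cluster);
-- fast_motion_timestamps[i-1] via pyGet?: for i ≥ 1 the index i-1 is always in range, so pyGet? is
-- `some` and the `.getD 0` default is never used (exact).
def find_timestamp_clusters (fast_motion_timestamps : List Int) (min_time_gap : Int) : List (List Int) :=
  let st := (PySem.List.enumerate fast_motion_timestamps 0).foldl
    (fun (s : List (List Int) × List Int) (p : Int × Int) =>
      if p.1 == 0 then (s.1, s.2 ++ [p.2])
      else if p.2 - ((PySem.List.pyGet? fast_motion_timestamps (p.1 - 1)).getD 0) ≤ min_time_gap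
        then (s.1, s.2 ++ [p.2])
        else (s.1 ++ [s.2], [p.2])) ([], [])
  if st.2 ≠ [] then st.1 ++ [st.2] else st.1

-- ===== PORT B =====
-- literal port of Source B: `for t in reversed(...)` = foldl over the reversed list; `rev and rev[-1]...`
-- via getLast? (none = empty); rev[-1][-1] via getLast?.getD 0 — every built cluster is nonempty,
-- so the default is never used (exact); c[::-1] and reversed(rev) are List.reverse.
def find_timestamp_clusters_alt (fast_motion_timestamps : List Int) (min_time_gap : Int) : List (List Int) :=
  let rev := fast_motion_timestamps.reverse.foldl
    (fun rev t =>
      match rev.getLast? with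
      | some c =>
        if c.getLast?.getD 0 - t ≤ min_time_gap then rev.dropLast ++ [c ++ [t]] else rev ++ [[t]]
      | none => [[t]]) []
  rev.reverse.map List.reverse

-- ===== PRECONDITION & SPEC =====
def Spec_find_timestamp_clusters (fast_motion_timestamps : List Int) (min_time_gap : Int) (out : List (List Int)) : Prop := out = find_timestamp_clusters_alt fast_motion_timestamps min_time_gap
instance (fast_motion_timestamps : List Int) (min_time_gap : Int) (out : List (List Int)) : Decidable (Spec_find_timestamp_clusters fast_motion_timestamps min_time_gap out) := by unfold Spec_find_timestamp_clusters; infer_instance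

-- ===== CLAIM (what is proved, stated in full; the proofs are below) =====
def Claim_equal_find_timestamp_clusters : Prop := ∀ (fast_motion_timestamps : List Int) (min_time_gap : Int), Dom_find_timestamp_clusters fast_motion_timestamps min_time_gap → Spec_find_timestamp_clusters fast_motion_timestamps min_time_gap (find_timestamp_clusters fast_motion_timestamps min_time_gap)

-- ===== LEMMAS AND PROOFS =====

-- B's foldr form, used as the common middle point of the proof.
def fstepB (g t : Int) (clusters : List (List Int)) : List (List Int) :=
  match clusters with
  | c :: rest => if c.headD 0 - t ≤ g then (t :: c) :: rest else [t] :: c :: rest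
  | [] => [[t]]

def grpB (g : Int) (xs : List Int) : List (List Int) := xs.foldr (fstepB g) []

-- B's loop body, named (definitionally equal to the port's inline code).
def stepB (g : Int) (rev : List (List Int)) (t : Int) : List (List Int) :=
  match rev.getLast? with
  | some c => if c.getLast?.getD 0 - t ≤ g then rev.dropLast ++ [c ++ [t]] else rev ++ [[t]]
  | none => [[t]]

theorem B_def (xs : List Int) (g : Int) :
    find_timestamp_clusters_alt xs g
      = (xs.reverse.foldl (stepB g) []).reverse.map List.reverse := rfl

-- one step of B's reversed accumulation is one step of the foldr form, under un-reversing
theorem step_commute (g t : Int) (rev : List (List Int)) :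
    (stepB g rev t).reverse.map List.reverse = fstepB g t (rev.reverse.map List.reverse) := by
  rcases List.eq_nil_or_concat rev with h | ⟨ds, c, h⟩
  · subst h; rfl
  · subst h
    unfold stepB fstepB
    simp only [List.concat_eq_append]
    rw [List.getLast?_concat, List.dropLast_concat]
    have hh : (c.reverse).headD 0 = c.getLast?.getD 0 := by
      rw [List.headD_eq_head?_getD, List.head?_reverse]
    simp only [List.reverse_append, List.reverse_cons, List.reverse_nil, List.nil_append,
      List.cons_append, List.map_cons]
    show _ = if (c.reverse).headD 0 - t ≤ g then (t :: c.reverse) :: List.map List.reverse ds.reverse else [t] :: c.reverse :: List.map List.reverse ds.reverse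
    rw [hh]
    split_ifs with hc
    · simp
    · simp

theorem foldl_stepB_commute (g : Int) (l : List Int) :
    ∀ rev : List (List Int),
      (l.foldl (stepB g) rev).reverse.map List.reverse
        = l.foldl (fun cs t => fstepB g t cs) (rev.reverse.map List.reverse) := by
  induction l with
  | nil => intro rev; rfl
  | cons t l ih =>
    intro rev
    rw [List.foldl_cons, List.foldl_cons, ih, step_commute]

theorem alt_eq_grpB (xs : List Int) (g : Int) :
    find_timestamp_clusters_alt xs g = grpB g xs := by
  rw [B_def, foldl_stepB_commute]
  simp only [List.reverse_nil, List.map_nil, List.foldl_reverse]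
  rfl

-- A's loop body and finalizer, named for the proofs (definitionally equal to the port's inline code).
def stepA (xs : List Int) (g : Int) (s : List (List Int) × List Int) (p : Int × Int) : List (List Int) × List Int :=
  if p.1 == 0 then (s.1, s.2 ++ [p.2])
  else if p.2 - ((PySem.List.pyGet? xs (p.1 - 1)).getD 0) ≤ g
    then (s.1, s.2 ++ [p.2])
    else (s.1 ++ [s.2], [p.2])

def finA (st : List (List Int) × List Int) : List (List Int) :=
  if st.2 ≠ [] then st.1 ++ [st.2] else st.1

theorem A_def (xs : List Int) (g : Int) :
    find_timestamp_clusters xs g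
      = finA ((PySem.List.enumerate xs 0).foldl (stepA xs g) ([], [])) := rfl

-- one step of the foldr form, unfolded
theorem alt_cons (g x : Int) (xs : List Int) :
    grpB g (x :: xs) =
      match grpB g xs with
      | c :: rest => if c.headD 0 - x ≤ g then (x :: c) :: rest else [x] :: c :: rest
      | [] => [[x]] := rfl

-- B's first cluster starts with the list's first element.
theorem alt_cons_head (g : Int) (x : Int) (xs : List Int) :
    ∃ t rest, grpB g (x :: xs) = (x :: t) :: rest := by
  induction xs generalizing x with
  | nil => exact ⟨[], [], rfl⟩
  | cons y ys ih =>
    obtain ⟨t, rest, h⟩ := ih y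
    rw [alt_cons, h]
    by_cases hc : y - x ≤ g
    · exact ⟨y :: t, rest, by dsimp only; simp only [List.headD_cons]; rw [if_pos hc]⟩
    · exact ⟨[], (y :: t) :: rest, by dsimp only; simp only [List.headD_cons]; rw [if_neg hc]⟩

-- Main invariant: A's fold over the enumerated suffix, started with a nonempty current
-- cluster, produces cl ++ B's grouping of (prev :: suffix) with the first cluster's head
-- element replaced by the accumulated current cluster.
theorem foldA_main (g : Int) (xs : List Int) (suffix : List Int) :
    ∀ (i : Nat) (prev : Int) (cl : List (List Int)) (cur : List Int),
      cur ≠ [] → xs.drop i = prev :: suffix →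
      ∀ t rest, grpB g (prev :: suffix) = (prev :: t) :: rest →
      finA ((PySem.List.enumerate suffix ((i : Int) + 1)).foldl (stepA xs g) (cl, cur))
        = cl ++ ((cur ++ t) :: rest) := by
  induction suffix with
  | nil =>
    intro i prev cl cur hcur _ t rest h
    obtain ⟨ht, hr⟩ : t = [] ∧ rest = [] := by
      have h' : ([[prev]] : List (List Int)) = (prev :: t) :: rest := h
      simpa using h'.symm
    subst ht; subst hr
    simp [PySem.List.enumerate_nil, finA, hcur]
  | cons y ys ih =>
    intro i prev cl cur hcur hdrop t rest h
    have hgetE : xs[i]? = some prev := by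
      rw [← List.head?_drop, hdrop]; rfl
    have hdrop' : xs.drop (i + 1) = y :: ys := by
      have := congrArg List.tail hdrop
      simpa [← List.tail_drop] using this
    obtain ⟨t', rest', h'⟩ := alt_cons_head g y ys
    rw [alt_cons, h'] at h
    dsimp only at h; simp only [List.headD_cons] at h
    rw [show PySem.List.enumerate (y :: ys) ((i : Int) + 1)
          = ((i : Int) + 1, y) :: PySem.List.enumerate ys ((i : Int) + 1 + 1)
        from PySem.List.enumerate_cons .., List.foldl_cons]
    have hne : ¬ ((((i : Int) + 1) == 0) = true) := by simp; omega
    have hidx : ((i : Int) + 1 - 1) = (i : Int) := by ring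
    have hstep : ∀ s : List (List Int) × List Int,
        stepA xs g s ((i : Int) + 1, y)
          = if y - prev ≤ g then (s.1, s.2 ++ [y]) else (s.1 ++ [s.2], [y]) := by
      intro s
      unfold stepA
      rw [if_neg hne]
      dsimp only
      rw [hidx, PySem.List.pyGet?_natCast, hgetE]
      rfl
    have hcast : ((i : Int) + 1 + 1) = (((i + 1 : Nat) : Int) + 1) := by push_cast; ring
    by_cases hc : y - prev ≤ g
    · -- stays in the current cluster
      rw [if_pos hc] at h
      obtain ⟨ht, hr⟩ : t = y :: t' ∧ rest = rest' := by
        have := h; simp at this; exact ⟨this.1.symm, this.2.symm⟩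
      subst ht; subst hr
      rw [hstep, if_pos hc, hcast]
      have := ih (i + 1) y cl (cur ++ [y]) (by simp) hdrop' t' _ h'
      simpa [List.append_assoc] using this
    · -- close the current cluster, open a new one
      rw [if_neg hc] at h
      obtain ⟨ht, hr⟩ : t = [] ∧ rest = (y :: t') :: rest' := by
        have := h; simp at this; exact ⟨this.1, this.2.symm⟩
      subst ht; subst hr
      rw [hstep, if_neg hc, hcast]
      have := ih (i + 1) y (cl ++ [cur]) [y] (by simp) hdrop' t' _ h'
      simpa [List.append_assoc] using this

-- ===== VERDICT (by name: the statement is the Claim_ definition above) =====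
theorem find_timestamp_clusters_spec : Claim_equal_find_timestamp_clusters := by
  intro xs g _hdom
  unfold Spec_find_timestamp_clusters
  rw [alt_eq_grpB]
  cases xs with
  | nil => rfl
  | cons x rest =>
    obtain ⟨t, rest', h⟩ := alt_cons_head g x rest
    rw [A_def, h]
    have hstep0 : PySem.List.enumerate (x :: rest) 0
        = ((0 : Int), x) :: PySem.List.enumerate rest 1 := by
      simp [PySem.List.enumerate_cons]
    rw [hstep0, List.foldl_cons]
    rw [show stepA (x :: rest) g ([], []) ((0 : Int), x) = ([], [x]) from rfl]
    have := foldA_main g (x :: rest) rest 0 x [] [x] (by simp) (by simp) t rest' h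
    simpa using this
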